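-- pv_equiv track=rewrite | github.com/SebPuchi/LC100 | questions/hashmap/medium/encode_and_decode.py | codeFound
-- ===== SOURCE A (Python) =====
-- def codeFound(s, j):
--     num = ""
--
--     for i in range(j, len(s)):
--         if s[i].isnumeric():
--             num+=s[i]
--             continue
--         elif s[i] == "$":
--             return (True, num)
--     return (False, num)
-- ===== SOURCE B (Python) =====
-- def codeFound(s, j):
--     idx = s.find('$', j)
--     if idx != -1:
--         return (True, ''.join(c for c in s[j:idx] if c.isnumeric()))
--     return (False, ''.join(c for c in s[j:] if c.isnumeric()))
-- ===== Notes on version B (the rewrite author's own statement) =====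
-- stated objective: idiomatic
-- what changed: Replaces A's single interleaved index loop (collect digits, early-return on '$') by two separate passes: first locate the delimiter with s.find('$', j), then collect the digits of the relevant segment with one filtered join.
-- outside the precondition, e.g. on codeFound('$1', -1): A returns (True, '1'), B returns (False, '1')
import Mathlib
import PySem

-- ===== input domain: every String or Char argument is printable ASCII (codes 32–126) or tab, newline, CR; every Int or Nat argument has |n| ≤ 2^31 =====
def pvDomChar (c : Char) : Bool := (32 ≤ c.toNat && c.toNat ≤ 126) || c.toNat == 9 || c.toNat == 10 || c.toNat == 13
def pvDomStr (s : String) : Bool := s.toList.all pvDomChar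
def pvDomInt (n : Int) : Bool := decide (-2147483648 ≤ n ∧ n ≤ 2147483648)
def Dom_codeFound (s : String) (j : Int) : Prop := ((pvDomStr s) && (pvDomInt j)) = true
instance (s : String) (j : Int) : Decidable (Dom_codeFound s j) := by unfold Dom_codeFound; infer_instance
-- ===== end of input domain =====

-- B locates the '$' delimiter with s.find('$', j) first and then collects the digits of
-- the relevant segment in a second filtered pass, instead of A's single interleaved scan
-- with an early return (objective: idiomatic, same cost). On the ASCII domain Dom_,
-- Python's str.isnumeric coincides with isdigit ('0'..'9'); both ports use
-- PySem.Chars.isdigit, exact on that domain.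

-- ===== PORT A =====
-- A's for-loop: i ranges over range(j, len(s)); num is the accumulated digit string
-- (carried as List Char, Python's str ported on the list side, String.ofList at return).
def codeFoundLoop (cs : List Char) : List Int → List Char → Bool × List Char
  | [], num => (false, num)
  | i :: rest, num =>
    match PySem.List.pyGet? cs i with
    | none => (false, num)   -- s[i] raises IndexError here (only when j < -len(s)); excluded by Pre_
    | some c =>
      if PySem.Chars.isdigit c then codeFoundLoop cs rest (num ++ [c])
      else if c = '$' then (true, num)
      else codeFoundLoop cs rest num

def codeFound (s : String) (j : Int) : Bool × String :=
  let r := codeFoundLoop s.toList (PySem.List.pyRange j (s.toList.length : Int) 1) []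
  (r.1, String.ofList r.2)

-- ===== PORT B =====
def codeFound_alt (s : String) (j : Int) : Bool × String :=
  let idx := PySem.Str.findFrom s "$" j
  if idx ≠ -1 then
    (true, String.ofList ((PySem.Str.slice s (some j) (some idx)).toList.filter PySem.Chars.isdigit))
  else
    (false, String.ofList ((PySem.Str.slice s (some j) none).toList.filter PySem.Chars.isdigit))

-- ===== PRECONDITION & SPEC =====
-- Pre_ restricts the scan-start index j to its natural domain 0 ≤ j: for j < -len(s) A
-- raises IndexError, and for -len(s) ≤ j < 0 A's negative-index wraparound makes it scan
-- a suffix and then the whole string again — an accidental double scan no caller of this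
-- encode/decode helper relies on (B does the natural clamped-find thing there).
def Pre_codeFound (s : String) (j : Int) : Prop := 0 ≤ j
instance (s : String) (j : Int) : Decidable (Pre_codeFound s j) := by unfold Pre_codeFound; infer_instance

def pvWitness_codeFound : String × Int := ("ab12$xy", 1)

def Spec_codeFound (s : String) (j : Int) (out : Bool × String) : Prop := out = codeFound_alt s j
instance (s : String) (j : Int) (out : Bool × String) : Decidable (Spec_codeFound s j out) := by unfold Spec_codeFound; infer_instance

-- ===== CLAIM (what is proved, stated in full; the proofs are below) =====
def Claim_equal_codeFound : Prop := ∀ (s : String) (j : Int), Dom_codeFound s j → Pre_codeFound s j → Spec_codeFound s j (codeFound s j)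

-- ===== LEMMAS AND PROOFS =====

-- proof-side restatement of A's loop directly on the remaining character list
def listLoop : List Char → List Char → Bool × List Char
  | [], num => (false, num)
  | c :: t, num =>
    if PySem.Chars.isdigit c then listLoop t (num ++ [c])
    else if c = '$' then (true, num)
    else listLoop t num

theorem loopA_eq_aux (cs : List Char) : ∀ (d k : Nat) (num : List Char), k ≤ cs.length → cs.length - k = d →
    codeFoundLoop cs (PySem.List.pyRange (k : Int) (cs.length : Int) 1) num = listLoop (cs.drop k) num := by
  intro d
  induction d with
  | zero =>
    intro k num hk hd
    have hk' : k = cs.length := by omega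
    subst hk'
    rw [PySem.List.pyRange_one_eq_nil (le_refl _), List.drop_length]
    simp [codeFoundLoop, listLoop]
  | succ d ih =>
    intro k num hk hd
    have hlt : k < cs.length := by omega
    rw [PySem.List.pyRange_one_cons (by exact_mod_cast hlt), List.drop_eq_getElem_cons hlt]
    have hget : PySem.List.pyGet? cs (k : Int) = some cs[k] := by
      rw [PySem.List.pyGet?_natCast]; exact List.getElem?_eq_getElem hlt
    have hcast : ((k : Int) + 1) = ((k + 1 : Nat) : Int) := by push_cast; ring
    simp only [codeFoundLoop, listLoop, hget]
    rw [hcast]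
    by_cases hg : PySem.Chars.isdigit cs[k]
    · rw [if_pos hg, if_pos hg, ih (k+1) _ (by omega) (by omega)]
    · rw [if_neg hg, if_neg hg]
      by_cases hc : cs[k] = '$'
      · rw [if_pos hc, if_pos hc]
      · rw [if_neg hc, if_neg hc, ih (k+1) _ (by omega) (by omega)]

theorem listLoop_no_dollar (t : List Char) (num : List Char) (h : '$' ∉ t) :
    listLoop t num = (false, num ++ t.filter PySem.Chars.isdigit) := by
  induction t generalizing num with
  | nil => simp [listLoop]
  | cons c t ih =>
    have hc : c ≠ '$' := fun hc => h (hc ▸ List.mem_cons_self)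
    have ht : '$' ∉ t := fun ht => h (List.mem_cons_of_mem _ ht)
    by_cases hg : PySem.Chars.isdigit c
    · simp [listLoop, hg, ih _ ht]
    · simp [listLoop, hg, hc, ih _ ht]

theorem listLoop_dollar (t : List Char) (m : Nat) (num : List Char) (hm : m < t.length) (hd : t[m] = '$')
    (hfirst : ∀ i, (hi : i < m) → t[i]'(Nat.lt_trans hi hm) ≠ '$') :
    listLoop t num = (true, num ++ (t.take m).filter PySem.Chars.isdigit) := by
  induction t generalizing m num with
  | nil => simp at hm
  | cons c t ih =>
    cases m with
    | zero =>
      have hc : c = '$' := by simpa using hd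
      subst hc
      have hdig : PySem.Chars.isdigit '$' = false := by decide
      simp [listLoop, hdig]
    | succ m =>
      have hc : c ≠ '$' := by simpa using hfirst 0 (Nat.succ_pos m)
      have hm' : m < t.length := by simpa using hm
      have hd' : t[m] = '$' := by simpa using hd
      have hfirst' : ∀ i, (hi : i < m) → t[i]'(Nat.lt_trans hi hm') ≠ '$' := by
        intro i hi
        simpa using hfirst (i+1) (Nat.succ_lt_succ hi)
      by_cases hg : PySem.Chars.isdigit c
      · simp [listLoop, hg, ih m _ hm' hd' hfirst']
      · simp [listLoop, hg, hc, ih m _ hm' hd' hfirst']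

theorem singleton_infix_iff_mem (a : Char) (t : List Char) : [a] <:+: t ↔ a ∈ t := by
  constructor
  · intro h; exact List.singleton_sublist.mp h.sublist
  · intro h
    obtain ⟨u, v, rfl⟩ := List.append_of_mem h
    exact ⟨u, v, by simp⟩

-- findFrom with a start strictly past the end of the string is -1
theorem findFrom_past_end (cs sub : List Char) (j : Int) (h : (cs.length : Int) < j) :
    PySem.Chars.findFrom cs sub j = -1 := by
  have h0 : ¬ j < 0 := by omega
  simp [PySem.Chars.findFrom, h0, h]

-- ===== VERDICT (by name: the statement is the Claim_ definition above) =====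
theorem codeFound_spec : Claim_equal_codeFound := by
  intro s j _ hpre
  unfold Spec_codeFound
  have hpre' : 0 ≤ j := hpre
  obtain ⟨k, rfl⟩ : ∃ k : Nat, j = (k : Int) := ⟨j.toNat, (Int.toNat_of_nonneg hpre').symm⟩
  have hdollar : ("$" : String).toList = ['$'] := by decide
  by_cases hk : k ≤ s.toList.length
  · -- in-range start
    unfold codeFound codeFound_alt
    rw [loopA_eq_aux s.toList (s.toList.length - k) k [] hk rfl]
    simp only [PySem.Str.findFrom_eq, hdollar,
      PySem.Chars.findFrom_natCast s.toList ['$'] k hk]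
    by_cases hf : PySem.Chars.find (s.toList.drop k) ['$'] = -1
    · -- no '$' from position k on
      have hmem : '$' ∉ s.toList.drop k := fun hm =>
        (PySem.Chars.find_eq_neg_one_iff _ ['$']).mp hf
          ((singleton_infix_iff_mem '$' _).mpr hm)
      rw [listLoop_no_dollar _ _ hmem]
      simp [hf, PySem.List.slice_from s.toList (Int.natCast_nonneg k)]
    · -- first '$' at index k + m of s
      have hf0 : 0 ≤ PySem.Chars.find (s.toList.drop k) ['$'] := by
        have := PySem.Chars.neg_one_le_find (s.toList.drop k) ['$']
        omega
      set t := s.toList.drop k with ht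
      set f := PySem.Chars.find t ['$'] with hfdef
      set m := f.toNat with hmdef
      have hfm : f = (m : Int) := (Int.toNat_of_nonneg hf0).symm
      obtain ⟨hpfx, hmin⟩ := PySem.Chars.find_spec (s := t) (sub := ['$']) hf0
      have hmlt : m < t.length := by
        by_contra hge
        rw [List.drop_eq_nil_of_le (by omega)] at hpfx
        simp at hpfx
      have hdm : t[m] = '$' := by
        rw [List.drop_eq_getElem_cons hmlt, List.cons_prefix_cons] at hpfx
        exact hpfx.1.symm
      have hfirst : ∀ i, (hi : i < m) → t[i]'(Nat.lt_trans hi hmlt) ≠ '$' := by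
        intro i hi heq
        apply hmin i hi
        rw [List.drop_eq_getElem_cons (Nat.lt_trans hi hmlt), heq, List.cons_prefix_cons]
        exact ⟨rfl, List.nil_prefix⟩
      rw [listLoop_dollar t m [] hmlt hdm hfirst]
      have hne : ¬ ((k : Int) + f = -1) := by omega
      have hslice : PySem.List.slice s.toList (some (k : Int)) (some ((k : Int) + f))
          = t.take m := by
        rw [PySem.List.slice_toNat s.toList (Int.natCast_nonneg k) (by omega)]
        have h1 : ((k : Int) + f).toNat - ((k : Int)).toNat = m := by omega
        rw [h1, Int.toNat_natCast, ht]
      simp [hf, hne, hslice]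
  · -- start past the end of the string: both sides give (False, "")
    have hklt : s.toList.length < k := by omega
    unfold codeFound codeFound_alt
    rw [PySem.List.pyRange_one_eq_nil (by exact_mod_cast hklt.le)]
    have hff : PySem.Chars.findFrom s.toList ['$'] (k : Int) = -1 :=
      findFrom_past_end _ _ _ (by exact_mod_cast hklt)
    simp [codeFoundLoop, hdollar, hff, PySem.List.slice_from s.toList (Int.natCast_nonneg k),
      List.drop_eq_nil_of_le hklt.le]
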